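-- pv_equiv track=rewrite | github.com/tresreid/CMSC-162 | homework/storm.py | saffir_simpson_day
-- ===== SOURCE A (Python) =====
-- def saffir_simpson_day(aveday):
--     # convertes to saffir simpson scale and adds it based on year
--     yearwinds = {}
--     for item in aveday:
--         if aveday[item] < 82:
--             yearwinds[item[:4]] =  yearwinds.get(item[:4], []) + [1]
--         elif aveday[item] < 95:
--             yearwinds[item[:4]] =  yearwinds.get(item[:4], []) + [2]
--         elif aveday[item] < 112:
--             yearwinds[item[:4]] =  yearwinds.get(item[:4], []) + [3]
--         elif aveday[item] < 136:
--             yearwinds[item[:4]] =  yearwinds.get(item[:4], []) + [4]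
--         else:
--             yearwinds[item[:4]] =  yearwinds.get(item[:4], []) + [5]
--     return yearwinds
-- ===== SOURCE B (Python) =====
-- _THRESHOLDS = (82, 95, 112, 136)
--
-- def _category(w):
--     # binary search for the Saffir-Simpson category of wind speed w
--     lo, hi = 0, 4
--     while lo < hi:
--         mid = (lo + hi) // 2
--         if w < _THRESHOLDS[mid]:
--             hi = mid
--         else:
--             lo = mid + 1
--     return lo + 1
--
-- def saffir_simpson_day(aveday):
--     # stage 1: group the raw wind speeds by year prefix
--     groups = {}
--     for key in aveday:
--         groups.setdefault(key[:4], []).append(aveday[key])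
--     # stage 2: classify each group's speeds via binary search
--     return {year: [_category(w) for w in ws] for year, ws in groups.items()}
-- ===== Notes on version B (the rewrite author's own statement) =====
-- stated objective: alternative
-- what changed: B is a two-stage pipeline - first group the raw wind speeds by year prefix, then classify every group's speeds with a binary search over the threshold table - instead of A's single pass that classifies each entry with a 5-way if/elif cascade while grouping.
import Mathlib
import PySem

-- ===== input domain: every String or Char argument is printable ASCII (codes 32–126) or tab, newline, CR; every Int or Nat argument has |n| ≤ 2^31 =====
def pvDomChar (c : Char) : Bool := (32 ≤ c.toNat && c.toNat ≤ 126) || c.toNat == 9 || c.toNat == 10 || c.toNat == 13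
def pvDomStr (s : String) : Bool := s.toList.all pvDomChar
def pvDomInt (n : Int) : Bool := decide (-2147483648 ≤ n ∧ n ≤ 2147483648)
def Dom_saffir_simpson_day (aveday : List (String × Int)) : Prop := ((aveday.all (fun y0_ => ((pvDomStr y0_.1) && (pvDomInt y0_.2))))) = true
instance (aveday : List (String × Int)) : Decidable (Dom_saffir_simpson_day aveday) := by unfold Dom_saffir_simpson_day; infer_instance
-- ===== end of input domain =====

-- B is a two-stage pipeline (group raw speeds by year prefix, then classify each group's speeds
-- by binary search over the threshold table) instead of A's single classify-while-grouping pass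
-- with a 5-way cascade; same return value (alternative algorithm, no speed claim).
-- The Python parameter is a dict; it arrives here as its association list, so both ports first
-- rebuild the dict (last value per key wins) exactly as dict(pairs) does.
-- ===== PORT A =====
def saffir_simpson_day (aveday : List (String × Int)) : List (String × List Int) :=
  let d := PySem.Dict.ofList aveday
  let yearwinds := d.items.foldl
    (fun (yw : PySem.Dict String (List Int)) (p : String × Int) =>
      let key := PySem.Str.slice p.1 none (some 4)
      if p.2 < 82 then yw.insert key (yw.getD key [] ++ [1])
      else if p.2 < 95 then yw.insert key (yw.getD key [] ++ [2])
      else if p.2 < 112 then yw.insert key (yw.getD key [] ++ [3])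
      else if p.2 < 136 then yw.insert key (yw.getD key [] ++ [4])
      else yw.insert key (yw.getD key [] ++ [5]))
    PySem.Dict.empty
  yearwinds.items

-- ===== PORT B =====
def pvThresholds : List Int := [82, 95, 112, 136]

-- while lo < hi: binary search in the threshold table; terminates since hi - lo shrinks
def pvCategoryLoop (w : Int) (lo hi : Nat) : Nat :=
  if lo < hi then
    let mid := (lo + hi) / 2
    if w < pvThresholds.getD mid 0 then pvCategoryLoop w lo mid
    else pvCategoryLoop w (mid + 1) hi
  else lo
termination_by hi - lo
decreasing_by all_goals omega

def pvCategory (w : Int) : Int := (pvCategoryLoop w 0 4 : Int) + 1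

def saffir_simpson_day_alt (aveday : List (String × Int)) : List (String × List Int) :=
  -- stage 1: group the raw wind speeds by year prefix
  let groups := (PySem.Dict.ofList aveday).items.foldl
    (fun (g : PySem.Dict String (List Int)) (p : String × Int) =>
      g.modify (PySem.Str.slice p.1 none (some 4)) [] (· ++ [p.2]))
    PySem.Dict.empty
  -- stage 2: dict comprehension classifying each group's speeds
  let out := groups.items.foldl
    (fun (d : PySem.Dict String (List Int)) (q : String × List Int) =>
      d.insert q.1 (q.2.map pvCategory))
    PySem.Dict.empty
  out.items

-- ===== PRECONDITION & SPEC =====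
def Spec_saffir_simpson_day (aveday : List (String × Int)) (out : List (String × List Int)) : Prop := out = saffir_simpson_day_alt aveday
instance (aveday : List (String × Int)) (out : List (String × List Int)) : Decidable (Spec_saffir_simpson_day aveday out) := by unfold Spec_saffir_simpson_day; infer_instance

-- ===== CLAIM (what is proved, stated in full; the proofs are below) =====
def Claim_equal_saffir_simpson_day : Prop := ∀ (aveday : List (String × Int)), Dom_saffir_simpson_day aveday → Spec_saffir_simpson_day aveday (saffir_simpson_day aveday)

-- ===== LEMMAS AND PROOFS =====

-- the binary search computes the cascade's category
lemma pvCategory_eq (w : Int) :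
    pvCategory w = (if w < 82 then 1 else if w < 95 then 2 else if w < 112 then 3
                    else if w < 136 then 4 else (5 : Int)) := by
  unfold pvCategory
  rw [pvCategoryLoop]
  norm_num [pvThresholds]
  by_cases h3 : w < 112 <;> simp only [h3, if_true, if_false]
  · rw [pvCategoryLoop]; norm_num [pvThresholds]
    by_cases h2 : w < 95 <;> simp only [h2, if_true, if_false]
    · rw [pvCategoryLoop]; norm_num [pvThresholds]
      by_cases h1 : w < 82 <;> simp only [h1, if_true, if_false]
      · rw [pvCategoryLoop]; norm_num; try omega
      · rw [pvCategoryLoop]; norm_num; try omega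
    · rw [pvCategoryLoop]; norm_num; try omega
  · rw [pvCategoryLoop]; norm_num [pvThresholds]
    by_cases h4 : w < 136 <;> simp only [h4, if_true, if_false]
    · rw [pvCategoryLoop]; norm_num; try omega
    · rw [pvCategoryLoop]; norm_num; try omega

-- the cascade's category as a function (proof-side abbreviation)
def pvCatA (v : Int) : Int :=
  if v < 82 then 1 else if v < 95 then 2 else if v < 112 then 3 else if v < 136 then 4 else 5

-- A's loop body is modify with the cascade category
lemma pv_stepA_eq :
    (fun (yw : PySem.Dict String (List Int)) (p : String × Int) =>
      let key := PySem.Str.slice p.1 none (some 4)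
      if p.2 < 82 then yw.insert key (yw.getD key [] ++ [1])
      else if p.2 < 95 then yw.insert key (yw.getD key [] ++ [2])
      else if p.2 < 112 then yw.insert key (yw.getD key [] ++ [3])
      else if p.2 < 136 then yw.insert key (yw.getD key [] ++ [4])
      else yw.insert key (yw.getD key [] ++ [5]))
    = (fun (yw : PySem.Dict String (List Int)) (p : String × Int) =>
        yw.modify (PySem.Str.slice p.1 none (some 4)) [] (· ++ [pvCatA p.2])) := by
  funext yw p
  simp only [PySem.Dict.modify, pvCatA]
  split_ifs <;> rfl

-- the core equality, over an arbitrary pair list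
lemma pv_core (l : List (String × Int)) :
    (l.foldl (fun (yw : PySem.Dict String (List Int)) (p : String × Int) =>
        yw.modify (PySem.Str.slice p.1 none (some 4)) [] (· ++ [pvCatA p.2]))
      PySem.Dict.empty).items
    = ((l.foldl (fun (g : PySem.Dict String (List Int)) (p : String × Int) =>
          g.modify (PySem.Str.slice p.1 none (some 4)) [] (· ++ [p.2]))
        PySem.Dict.empty).items.foldl
        (fun (d : PySem.Dict String (List Int)) (q : String × List Int) =>
          d.insert q.1 (q.2.map pvCategory))
        PySem.Dict.empty).items := by
  set key : String × Int → String := fun p => PySem.Str.slice p.1 none (some 4) with hkey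
  have hA : (l.foldl (fun (yw : PySem.Dict String (List Int)) (p : String × Int) =>
        yw.modify (key p) [] (· ++ [pvCatA p.2])) PySem.Dict.empty)
      = ((l.map (fun p => (key p, pvCatA p.2))).foldl
          (fun (d : PySem.Dict String (List Int)) q => d.modify q.1 [] (· ++ [q.2]))
          PySem.Dict.empty) := by
    rw [List.foldl_map]
  have hB : (l.foldl (fun (g : PySem.Dict String (List Int)) (p : String × Int) =>
        g.modify (key p) [] (· ++ [p.2])) PySem.Dict.empty)
      = ((l.map (fun p => (key p, p.2))).foldl
          (fun (d : PySem.Dict String (List Int)) q => d.modify q.1 [] (· ++ [q.2]))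
          PySem.Dict.empty) := by
    rw [List.foldl_map]
  rw [hA, hB]
  set lA := l.map (fun p => (key p, pvCatA p.2)) with hlA
  set lB := l.map (fun p => (key p, p.2)) with hlB
  set dA := (lA.foldl (fun (d : PySem.Dict String (List Int)) q =>
      d.modify q.1 [] (· ++ [q.2])) PySem.Dict.empty) with hdA
  set dB := (lB.foldl (fun (d : PySem.Dict String (List Int)) q =>
      d.modify q.1 [] (· ++ [q.2])) PySem.Dict.empty) with hdB
  have hndA : dA.keys.Nodup := by
    rw [hdA]
    exact PySem.Dict.nodup_keys_foldl_modify_key lA Prod.fst [] (fun _ q => (· ++ [q.2]))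
      PySem.Dict.empty (by simp [PySem.Dict.keys_empty])
  have hndB : dB.keys.Nodup := by
    rw [hdB]
    exact PySem.Dict.nodup_keys_foldl_modify_key lB Prod.fst [] (fun _ q => (· ++ [q.2]))
      PySem.Dict.empty (by simp [PySem.Dict.keys_empty])
  have hkeys : dA.keys = dB.keys := by
    rw [hdA, hdB,
      PySem.Dict.keys_foldl_modify_key (key := Prod.fst),
      PySem.Dict.keys_foldl_modify_key (key := Prod.fst)]
    simp [hlA, hlB, Function.comp_def]
  -- the comprehension over dB.items appends fresh distinct keys
  have hfresh : ((dB.items).foldl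
      (fun (d : PySem.Dict String (List Int)) (q : String × List Int) =>
        d.insert q.1 (q.2.map pvCategory)) PySem.Dict.empty).items
      = PySem.Dict.empty.items ++ dB.items.map (fun q => (q.1, q.2.map pvCategory)) := by
    exact PySem.Dict.items_foldl_insert_fresh (k := Prod.fst)
      (v := fun q => q.2.map pvCategory) (d := PySem.Dict.empty) (l := dB.items)
      (by intro a _; exact PySem.Dict.contains_empty a.1) hndB
  rw [hfresh]
  have hemp : (PySem.Dict.empty : PySem.Dict String (List Int)).items = [] := rfl
  rw [PySem.Dict.items_eq_map_keys dA hndA [], PySem.Dict.items_eq_map_keys dB hndB []]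
  simp only [hemp, List.nil_append, List.map_map, hkeys]
  apply List.map_congr_left
  intro k _
  simp only [Function.comp]
  congr 1
  have hgA : dA.getD k [] = (lA.filter (fun q => q.1 == k)).map Prod.snd := by
    rw [hdA, PySem.Dict.getD_foldl_modify_append]
    simp [PySem.Dict.getD_empty]
  have hgB : dB.getD k [] = (lB.filter (fun q => q.1 == k)).map Prod.snd := by
    rw [hdB, PySem.Dict.getD_foldl_modify_append]
    simp [PySem.Dict.getD_empty]
  rw [hgA, hgB, hlA, hlB, List.filter_map, List.filter_map]
  simp only [List.map_map, Function.comp_def]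
  apply List.map_congr_left
  intro p _
  exact (pvCategory_eq p.2).symm.trans rfl

-- ===== VERDICT (by name: the statement is the Claim_ definition above) =====
theorem saffir_simpson_day_spec : Claim_equal_saffir_simpson_day := by
  intro aveday _
  unfold Spec_saffir_simpson_day saffir_simpson_day saffir_simpson_day_alt
  rw [pv_stepA_eq]
  exact pv_core (PySem.Dict.ofList aveday).items
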